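-- pv_equiv track=rewrite | github.com/ROCm/FlyDSL | kernels/mha_pingpong_bf16_gfx1250.py | _expand_layout
-- ===== SOURCE A (Python) =====
-- def _expand_layout(shape, stride):
--     """Expand CuTE layout to flat offset list.
--
--     _expand_layout((8, 8, 4), (1, 16, 2048))
--     → [0, 1, ..., 7, 16, 17, ..., 23, ..., 6256, ..., 6263]
--     """
--     n = 1
--     for s in shape:
--         n *= s
--     offsets = []
--     for i in range(n):
--         off = 0
--         idx = i
--         for s, d in zip(shape, stride):
--             off += (idx % s) * d
--             idx //= s
--         offsets.append(off)
--     return offsets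
-- ===== SOURCE B (Python) =====
-- def _expand_layout(shape, stride):
--     # Balanced (pairwise) product for n, then a mixed-radix odometer that
--     # updates the offset incrementally, one pass over the n indices.
--     vals = list(shape)
--     while len(vals) > 1:
--         vals = [vals[i] * vals[i + 1] for i in range(0, len(vals) - 1, 2)] + \
--                ([vals[-1]] if len(vals) % 2 else [])
--     n = vals[0] if vals else 1
--     k = min(len(shape), len(stride))
--     digits = [0] * k
--     off = 0
--     out = []
--     for _ in range(n):
--         out.append(off)
--         for j in range(k):
--             digits[j] += 1
--             off += stride[j]
--             if digits[j] < shape[j]: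
--                 break
--             off -= shape[j] * stride[j]
--             digits[j] = 0
--     return out
-- ===== Notes on version B (the rewrite author's own statement) =====
-- stated objective: faster
-- what changed: B computes the total count n by a balanced pairwise product (cheap on big ints) instead of A's sequential fold, and replaces A's per-index mixed-radix decomposition (full mod/div chain over all k dimensions for each of the n indices) by a mixed-radix odometer that increments a digit vector and updates the offset incrementally; Pre_ excludes inputs with a negative extent in the zipped shape whose full product is still positive: negative extents are outside a layout's natural domain, and there the two algorithms legitimately disagree.
-- outside the precondition, e.g. on _expand_layout((-2, -3), (1, 16)): A returns [0, -17, -16, -33, -32, -1], B returns [0, 67, 134, 201, 268, 335]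
import Mathlib
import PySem

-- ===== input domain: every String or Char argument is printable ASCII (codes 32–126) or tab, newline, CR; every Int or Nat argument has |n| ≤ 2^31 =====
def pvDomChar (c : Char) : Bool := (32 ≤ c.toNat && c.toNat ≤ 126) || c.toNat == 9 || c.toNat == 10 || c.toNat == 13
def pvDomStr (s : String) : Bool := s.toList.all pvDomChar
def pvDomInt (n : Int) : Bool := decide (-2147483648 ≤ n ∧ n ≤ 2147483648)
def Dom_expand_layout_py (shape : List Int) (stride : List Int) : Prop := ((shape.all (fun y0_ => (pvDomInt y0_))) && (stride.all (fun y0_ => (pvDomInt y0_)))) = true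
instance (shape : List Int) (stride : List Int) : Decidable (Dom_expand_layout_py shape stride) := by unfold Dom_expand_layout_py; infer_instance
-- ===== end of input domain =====

-- B: balanced pairwise product for n and an incremental mixed-radix odometer instead of A's
-- per-index mod/div decomposition (measured faster); equivalence proved on Pre_ (genuine layouts:
-- zipped extents ≥ 1, or an empty range).

-- ===== PORT A =====
def expand_layout_py (shape : List Int) (stride : List Int) : List Int :=
  let n := shape.foldl (fun a s => a * s) 1
  (PySem.List.pyRange 0 n 1).foldl
    (fun offsets i =>
      let p := (shape.zip stride).foldl
        (fun (st : Int × Int) sd =>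
          (st.1 + PySem.Int.mod st.2 sd.1 * sd.2, PySem.Int.floordiv st.2 sd.1))
        (0, i)
      offsets ++ [p.1]) []

-- ===== PORT B =====
-- one level of the pairwise ('while len(vals) > 1') product reduction of Source B
def pvPairLevel : List Int → List Int
  | a :: b :: rest => a * b :: pvPairLevel rest
  | xs => xs

theorem pvPairLevel_length_le : ∀ xs : List Int, (pvPairLevel xs).length ≤ xs.length
  | [] => by simp [pvPairLevel]
  | [a] => by simp [pvPairLevel]
  | a :: b :: rest => by
      simp only [pvPairLevel, List.length_cons]
      have := pvPairLevel_length_le rest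
      omega

theorem pvPairLevel_length_lt (a b : Int) (rest : List Int) :
    (pvPairLevel (a :: b :: rest)).length < (a :: b :: rest).length := by
  have := pvPairLevel_length_le rest
  simp only [pvPairLevel, List.length_cons]
  omega

-- balanced product ('vals = list(shape); while len(vals) > 1: ...; n = vals[0] if vals else 1')
def pvProdTree : List Int → Int
  | [] => 1
  | [a] => a
  | a :: b :: rest => pvProdTree (pvPairLevel (a :: b :: rest))
termination_by xs => xs.length
decreasing_by exact pvPairLevel_length_lt a b rest

-- inner 'for j in range(k): digits[j]+=1; ... break' loop of Source B, as recursion over the parallel lists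
def pvBump : List Int → List (Int × Int) → Int → (List Int × Int)
  | g :: gs, (s, d) :: ps, off =>
      if g + 1 < s then ((g + 1) :: gs, off + d)
      else
        let r := pvBump gs ps (off + d - s * d)
        (0 :: r.1, r.2)
  | gs, _, off => (gs, off)

def expand_layout_py_alt (shape : List Int) (stride : List Int) : List Int :=
  let n := pvProdTree shape
  let pairs := shape.zip stride
  let st := (PySem.List.pyRange 0 n 1).foldl
    (fun (st : List Int × List Int × Int) _ =>
      let r := pvBump st.2.1 pairs st.2.2
      (st.1 ++ [st.2.2], r.1, r.2))
    ([], List.replicate pairs.length 0, 0)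
  st.1

-- ===== PRECONDITION & SPEC =====
-- Pre_ excludes inputs with a negative extent in the zipped shape whose full product is still
-- positive: negative extents are outside a layout's natural domain, and there the two algorithms
-- legitimately disagree (A still returns a value there).
def Pre_expand_layout_py (shape : List Int) (stride : List Int) : Prop :=
  shape.foldl (fun a s => a * s) 1 ≤ 0 ∨ ∀ p ∈ shape.zip stride, 1 ≤ p.1
instance (shape : List Int) (stride : List Int) : Decidable (Pre_expand_layout_py shape stride) := by
  unfold Pre_expand_layout_py; infer_instance

def pvWitness_expand_layout_py : List Int × List Int := ([2, 3], [1, 16])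

def Spec_expand_layout_py (shape : List Int) (stride : List Int) (out : List Int) : Prop := out = expand_layout_py_alt shape stride
instance (shape : List Int) (stride : List Int) (out : List Int) : Decidable (Spec_expand_layout_py shape stride out) := by unfold Spec_expand_layout_py; infer_instance

-- ===== CLAIM (what is proved, stated in full; the proofs are below) =====
def Claim_equal_expand_layout_py : Prop := ∀ (shape : List Int) (stride : List Int), Dom_expand_layout_py shape stride → Pre_expand_layout_py shape stride → Spec_expand_layout_py shape stride (expand_layout_py shape stride)

-- ===== LEMMAS AND PROOFS =====

-- the mixed-radix digits' contribution: offOf ps i = Σ_j (digit_j of i) * d_j, digit chain by floor mod/div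
def pvOffOf : List (Int × Int) → Int → Int
  | [], _ => 0
  | (s, d) :: ps, i => PySem.Int.mod i s * d + pvOffOf ps (PySem.Int.floordiv i s)

def pvDigitsOf : List (Int × Int) → Int → List Int
  | [], _ => []
  | (s, _) :: ps, i => PySem.Int.mod i s :: pvDigitsOf ps (PySem.Int.floordiv i s)

theorem pvA_inner (ps : List (Int × Int)) (c i : Int) :
    (ps.foldl (fun (st : Int × Int) sd =>
        (st.1 + PySem.Int.mod st.2 sd.1 * sd.2, PySem.Int.floordiv st.2 sd.1)) (c, i)).1
      = c + pvOffOf ps i := by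
  induction ps generalizing c i with
  | nil => simp [pvOffOf]
  | cons hd tl ih =>
      obtain ⟨s, d⟩ := hd
      simp only [List.foldl_cons, pvOffOf, ih]
      ring

theorem pvDigitsOf_zero (ps : List (Int × Int)) (h : ∀ p ∈ ps, 1 ≤ p.1) :
    pvDigitsOf ps 0 = List.replicate ps.length 0 := by
  induction ps with
  | nil => rfl
  | cons hd tl ih =>
      obtain ⟨s, d⟩ := hd
      have hs : (1 : Int) ≤ s := h (s, d) (List.mem_cons_self ..)
      have h0 : PySem.Int.mod 0 s = 0 := by
        rw [PySem.Int.mod_eq_emod_of_pos (by omega)]; simp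
      have h1 : PySem.Int.floordiv 0 s = 0 := by
        rw [PySem.Int.floordiv_eq_ediv_of_pos (by omega)]; simp
      simp [pvDigitsOf, h0, h1, List.replicate_succ,
        ih (fun p hp => h p (List.mem_cons_of_mem _ hp))]

theorem pvSucc_mod_div (i s : Int) (_hi : 0 ≤ i) (hs : 0 < s) :
    (PySem.Int.mod i s + 1 < s →
      PySem.Int.mod (i + 1) s = PySem.Int.mod i s + 1 ∧
      PySem.Int.floordiv (i + 1) s = PySem.Int.floordiv i s) ∧
    (PySem.Int.mod i s + 1 = s →
      PySem.Int.mod (i + 1) s = 0 ∧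
      PySem.Int.floordiv (i + 1) s = PySem.Int.floordiv i s + 1) := by
  rw [PySem.Int.mod_eq_emod_of_pos hs, PySem.Int.mod_eq_emod_of_pos hs,
    PySem.Int.floordiv_eq_ediv_of_pos hs, PySem.Int.floordiv_eq_ediv_of_pos hs]
  have hmod : 0 ≤ i % s := Int.emod_nonneg i (by omega)
  have hmod2 : i % s < s := Int.emod_lt_of_pos i hs
  have hdecomp : s * (i / s) + i % s = i := Int.mul_ediv_add_emod i s
  constructor
  · intro hlt
    have h1 : (i + 1) / s = i / s ∧ (i + 1) % s = i % s + 1 := by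
      rw [Int.ediv_emod_unique (by omega)]
      constructor
      · omega
      · omega
    exact ⟨h1.2, h1.1⟩
  · intro heq
    have h1 : (i + 1) / s = i / s + 1 ∧ (i + 1) % s = 0 := by
      rw [Int.ediv_emod_unique (by omega)]
      constructor
      · ring_nf; omega
      · omega
    exact ⟨h1.2, h1.1⟩

theorem pvBump_step (ps : List (Int × Int)) (h : ∀ p ∈ ps, 1 ≤ p.1) (i off : Int) (hi : 0 ≤ i) :
    pvBump (pvDigitsOf ps i) ps off
      = (pvDigitsOf ps (i + 1), off + (pvOffOf ps (i + 1) - pvOffOf ps i)) := by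
  induction ps generalizing i off with
  | nil => simp [pvBump, pvDigitsOf, pvOffOf]
  | cons hd tl ih =>
      obtain ⟨s, d⟩ := hd
      have hs : (0 : Int) < s := by
        have := h (s, d) (List.mem_cons_self ..); omega
      have hmod : 0 ≤ PySem.Int.mod i s ∧ PySem.Int.mod i s < s := by
        rw [PySem.Int.mod_eq_emod_of_pos hs]
        exact ⟨Int.emod_nonneg i (by omega), Int.emod_lt_of_pos i hs⟩
      have hqnn : 0 ≤ PySem.Int.floordiv i s := by
        rw [PySem.Int.floordiv_eq_ediv_of_pos hs]
        exact Int.ediv_nonneg hi (by omega)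
      obtain ⟨hcase1, hcase2⟩ := pvSucc_mod_div i s hi hs
      by_cases hlt : PySem.Int.mod i s + 1 < s
      · obtain ⟨hm, hq⟩ := hcase1 hlt
        simp only [pvDigitsOf, pvOffOf, pvBump, if_pos hlt, hm, hq, Prod.mk.injEq]
        exact ⟨trivial, by ring⟩
      · have heq : PySem.Int.mod i s + 1 = s := by omega
        obtain ⟨hm, hq⟩ := hcase2 heq
        simp only [pvDigitsOf, pvOffOf, pvBump, if_neg hlt, hm, hq]
        rw [ih (fun p hp => h p (List.mem_cons_of_mem _ hp)) _ _ hqnn]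
        simp only [Prod.mk.injEq]
        refine ⟨trivial, ?_⟩
        have hsd : PySem.Int.mod i s = s - 1 := by omega
        rw [hsd]; ring

theorem pvOffOf_zero (ps : List (Int × Int)) (h : ∀ p ∈ ps, 1 ≤ p.1) : pvOffOf ps 0 = 0 := by
  induction ps with
  | nil => rfl
  | cons hd tl ih =>
      obtain ⟨s, d⟩ := hd
      have hs : (1 : Int) ≤ s := h (s, d) (List.mem_cons_self ..)
      simp [pvOffOf, PySem.Int.mod_eq_emod_of_pos (by omega : (0:Int) < s),
        PySem.Int.floordiv_eq_ediv_of_pos (by omega : (0:Int) < s),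
        ih (fun p hp => h p (List.mem_cons_of_mem _ hp))]

theorem pvPairLevel_prod : ∀ xs : List Int, (pvPairLevel xs).prod = xs.prod
  | [] => by simp [pvPairLevel]
  | [a] => by simp [pvPairLevel]
  | a :: b :: rest => by
      simp [pvPairLevel, pvPairLevel_prod rest]
      ring

theorem pvProdTree_eq_prod : ∀ xs : List Int, pvProdTree xs = xs.prod
  | [] => by simp [pvProdTree]
  | [a] => by simp [pvProdTree]
  | a :: b :: rest => by
      rw [pvProdTree, pvProdTree_eq_prod (pvPairLevel (a :: b :: rest)), pvPairLevel_prod]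
termination_by xs => xs.length
decreasing_by exact pvPairLevel_length_lt a b rest

theorem pvProdTree_eq_foldl (xs : List Int) :
    pvProdTree xs = xs.foldl (fun a s => a * s) 1 := by
  rw [pvProdTree_eq_prod, List.prod_eq_foldl]

theorem pvB_nil (shape stride : List Int) (h : shape.foldl (fun a s => a * s) 1 ≤ 0) :
    expand_layout_py_alt shape stride = [] := by
  simp only [expand_layout_py_alt]
  rw [pvProdTree_eq_foldl, PySem.List.pyRange_one_eq_nil h]
  rfl

theorem pvOuter (pairs : List (Int × Int)) (h : ∀ p ∈ pairs, 1 ≤ p.1) (cnt : Nat) :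
    ∀ (t : Int), 0 ≤ t → ∀ (out : List Int),
    (PySem.List.pyRange t (t + cnt) 1).foldl
      (fun (st : List Int × List Int × Int) _ =>
        (st.1 ++ [st.2.2], (pvBump st.2.1 pairs st.2.2).1, (pvBump st.2.1 pairs st.2.2).2))
      (out, pvDigitsOf pairs t, pvOffOf pairs t)
    = (out ++ (PySem.List.pyRange t (t + cnt) 1).map (pvOffOf pairs),
       pvDigitsOf pairs (t + cnt), pvOffOf pairs (t + cnt)) := by
  induction cnt with
  | zero =>
      intro t ht out
      simp
  | succ c ih =>
      intro t ht out
      rw [PySem.List.pyRange_one_cons (by omega : t < t + (c + 1 : Nat))]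
      simp only [List.foldl_cons, List.map_cons]
      rw [pvBump_step pairs h t (pvOffOf pairs t) ht]
      simp only []
      have harith : pvOffOf pairs t + (pvOffOf pairs (t + 1) - pvOffOf pairs t)
          = pvOffOf pairs (t + 1) := by ring
      rw [harith]
      have hrange : (t : Int) + (c + 1 : Nat) = (t + 1) + (c : Nat) := by push_cast; ring
      rw [hrange]
      rw [ih (t + 1) (by omega) (out ++ [pvOffOf pairs t])]
      simp

theorem pvA_eq_map (shape stride : List Int) :
    expand_layout_py shape stride
      = (PySem.List.pyRange 0 (shape.foldl (fun a s => a * s) 1) 1).map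
          (pvOffOf (shape.zip stride)) := by
  unfold expand_layout_py
  rw [PySem.List.foldl_append_singleton_eq_map]
  simp only [List.nil_append]
  exact List.map_congr_left (fun i _ => pvA_inner (shape.zip stride) 0 i |>.trans (by ring))

-- ===== VERDICT (by name: the statement is the Claim_ definition above) =====
theorem expand_layout_py_spec : Claim_equal_expand_layout_py := by
  intro shape stride _hdom hpre
  unfold Spec_expand_layout_py
  rcases hpre with hn | hpos
  · rw [pvA_eq_map, PySem.List.pyRange_one_eq_nil hn, pvB_nil shape stride hn]
    rfl
  · by_cases hle : shape.foldl (fun a s => a * s) 1 ≤ 0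
    · rw [pvA_eq_map, PySem.List.pyRange_one_eq_nil hle, pvB_nil shape stride hle]
      rfl
    · set n := shape.foldl (fun a s => a * s) 1 with hndef
      have hpos' : 0 < n := by omega
      have hcnt : n = (0 : Int) + (n.toNat : Nat) := by omega
      have hout := pvOuter (shape.zip stride) hpos n.toNat 0 (le_refl 0) []
      rw [pvDigitsOf_zero _ hpos, pvOffOf_zero _ hpos] at hout
      rw [pvA_eq_map]
      simp only [expand_layout_py_alt]
      rw [pvProdTree_eq_foldl, ← hndef, hcnt, hout]
      simp
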